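-- pv_equiv track=rewrite | github.com/ShahnawazDev/ip-project-evaluation | Nikhil Khowal/metro_simulator.py | purafare
-- ===== SOURCE A (Python) =====
-- def purafare(totalstations):
--
--
--     # ye hamara slabs with DMRc refrenced prices ke saath
--     price_slabs = [
--         (2, 11),
--         (5, 21),
--         (12, 32),
--         (20, 43),
--         (29, 54)
--     ]
--
--     for limit, price in price_slabs:
--         if totalstations <= limit:
--             return price
--
--     return int(64 )
-- ===== SOURCE B (Python) =====
-- THRESHOLDS = [2, 5, 12, 20, 29]
-- PRICES = [11, 21, 32, 43, 54, 64]
--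
--
-- def purafare(totalstations):
--     # binary search: first index with THRESHOLDS[idx] >= totalstations (bisect_left)
--     lo, hi = 0, len(THRESHOLDS)
--     while lo < hi:
--         mid = (lo + hi) // 2
--         if THRESHOLDS[mid] < totalstations:
--             lo = mid + 1
--         else:
--             hi = mid
--     return PRICES[lo]
-- ===== Notes on version B (the rewrite author's own statement) =====
-- stated objective: alternative
-- what changed: Replaces A's linear scan over (limit, price) slab pairs with a bisect_left-style binary search over a threshold table indexing an aligned price list (64 as the final fallback entry).
import Mathlib
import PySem

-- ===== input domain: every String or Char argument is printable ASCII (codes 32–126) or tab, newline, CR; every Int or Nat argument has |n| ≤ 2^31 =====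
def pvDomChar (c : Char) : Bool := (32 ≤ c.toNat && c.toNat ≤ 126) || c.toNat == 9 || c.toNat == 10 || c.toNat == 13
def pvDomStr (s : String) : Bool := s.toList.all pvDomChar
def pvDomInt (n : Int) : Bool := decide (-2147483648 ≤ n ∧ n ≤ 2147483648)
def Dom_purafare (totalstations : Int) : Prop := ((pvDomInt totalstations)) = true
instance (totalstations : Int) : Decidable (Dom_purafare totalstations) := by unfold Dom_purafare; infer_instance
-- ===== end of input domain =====

-- B replaces A's linear slab scan with a binary search (bisect_left) into aligned
-- threshold/price tables; same value everywhere (objective: idiomatic/alternative).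

-- ===== PORT A =====
-- the for-loop with early return, recursion over the slab list
def purafareLoop (totalstations : Int) : List (Int × Int) → Int
  | [] => Int.ofNat 64        -- return int(64)
  | (limit, price) :: rest =>
      if totalstations ≤ limit then price else purafareLoop totalstations rest

def purafare (totalstations : Int) : Int :=
  purafareLoop totalstations [(2, 11), (5, 21), (12, 32), (20, 43), (29, 54)]

-- ===== PORT B =====
def pvThresholds : List Int := [2, 5, 12, 20, 29]
def pvPrices : List Int := [11, 21, 32, 43, 54, 64]

-- the while-loop of Source B: binary search, terminates since hi - lo shrinks
def bisectLoop (totalstations : Int) (lo hi : Nat) : Nat :=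
  if _h : lo < hi then
    let mid := (lo + hi) / 2
    if pvThresholds.getD mid 0 < totalstations then
      bisectLoop totalstations (mid + 1) hi
    else
      bisectLoop totalstations lo mid
  else lo
termination_by hi - lo
decreasing_by all_goals omega

def purafare_alt (totalstations : Int) : Int :=
  pvPrices.getD (bisectLoop totalstations 0 pvThresholds.length) 64

-- ===== PRECONDITION & SPEC =====
def Spec_purafare (totalstations : Int) (out : Int) : Prop := out = purafare_alt totalstations
instance (totalstations : Int) (out : Int) : Decidable (Spec_purafare totalstations out) := by unfold Spec_purafare; infer_instance

-- ===== CLAIM (what is proved, stated in full; the proofs are below) =====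
def Claim_equal_purafare : Prop := ∀ (totalstations : Int), Dom_purafare totalstations → Spec_purafare totalstations (purafare totalstations)

-- ===== LEMMAS AND PROOFS =====

-- ===== VERDICT (by name: the statement is the Claim_ definition above) =====
theorem purafare_spec : Claim_equal_purafare := by
  intro t _
  unfold Spec_purafare purafare purafare_alt
  by_cases h2 : t ≤ 2
  · rw [bisectLoop]; simp [pvThresholds]
    rw [if_neg (by omega), bisectLoop]
    simp [pvThresholds]; rw [if_neg (by omega), bisectLoop]
    simp [pvThresholds]; rw [if_neg (by omega), bisectLoop]
    simp [purafareLoop, pvPrices, h2]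
  · by_cases h5 : t ≤ 5
    · rw [bisectLoop]; simp [pvThresholds]
      rw [if_neg (by omega), bisectLoop]
      simp [pvThresholds]; rw [if_neg (by omega), bisectLoop]
      simp [pvThresholds]; rw [if_pos (by omega), bisectLoop]
      simp [purafareLoop, pvPrices]; omega
    · by_cases h12 : t ≤ 12
      · rw [bisectLoop]; simp [pvThresholds]
        rw [if_neg (by omega), bisectLoop]
        simp [pvThresholds]; rw [if_pos (by omega), bisectLoop]
        simp [purafareLoop, pvPrices]; omega
      · by_cases h20 : t ≤ 20
        · rw [bisectLoop]; simp [pvThresholds]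
          rw [if_pos (by omega), bisectLoop]
          simp [pvThresholds]; rw [if_neg (by omega), bisectLoop]
          simp [pvThresholds]; rw [if_neg (by omega), bisectLoop]
          simp [purafareLoop, pvPrices]; omega
        · by_cases h29 : t ≤ 29
          · rw [bisectLoop]; simp [pvThresholds]
            rw [if_pos (by omega), bisectLoop]
            simp [pvThresholds]; rw [if_neg (by omega), bisectLoop]
            simp [pvThresholds]; rw [if_pos (by omega), bisectLoop]
            simp [purafareLoop, pvPrices]; omega
          · rw [bisectLoop]; simp [pvThresholds]
            rw [if_pos (by omega), bisectLoop]
            simp [pvThresholds]; rw [if_pos (by omega), bisectLoop]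
            simp [purafareLoop, pvPrices]; omega
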